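-- pv_equiv track=rewrite | github.com/hojoungjang/programming-exercises | 탑-보기/solution.py | solution
-- ===== SOURCE A (Python) =====
-- LEFT = 0
--
-- RIGHT = 1
--
-- def solution(heights):
--     stack = []
--     counts = [0 for _ in range(len(heights))]
--     closests = [[-1, -1] for _ in range(len(heights))]
--
--     for i in range(len(heights)):
--         while stack and heights[stack[-1]] <= heights[i]:
--             stack.pop()
--         if stack:
--             closests[i][LEFT] = stack[-1]
--         counts[i] += len(stack)
--         stack.append(i)
--
--     stack = []
--     for i in reversed(range(len(heights))):
--         while stack and heights[stack[-1]] <= heights[i]: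
--             stack.pop()
--         if stack:
--             closests[i][RIGHT] = stack[-1]
--         counts[i] += len(stack)
--         stack.append(i)
--
--     ans = []
--     for i in range(len(heights)):
--         if closests[i][LEFT] == -1 or closests[i][RIGHT] == -1:
--             closest = max(closests[i])
--         elif i - closests[i][LEFT] <= closests[i][RIGHT] - i:
--             closest = closests[i][LEFT]
--         else:
--             closest = closests[i][RIGHT]
--         ans.append((counts[i], closest+1))
--     return ans
-- ===== SOURCE B (Python) =====
-- def solution(heights):
--     n = len(heights)
--     ans = []
--     for i in range(n):
--         m = heights[i]; lc = 0; lj = -1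
--         for j in range(i - 1, -1, -1):
--             if heights[j] > m:
--                 lc += 1
--                 if lj == -1:
--                     lj = j
--                 m = heights[j]
--         m = heights[i]; rc = 0; rj = -1
--         for j in range(i + 1, n):
--             if heights[j] > m:
--                 rc += 1
--                 if rj == -1:
--                     rj = j
--                 m = heights[j]
--         if lj == -1 or rj == -1:
--             closest = max(lj, rj)
--         elif i - lj <= rj - i:
--             closest = lj
--         else:
--             closest = rj
--         ans.append((lc + rc, closest + 1))
--     return ans
-- ===== Notes on version B (the rewrite author's own statement) =====
-- stated objective: simpler
-- what changed: Replaces A's two shared monotonic-stack passes (with index arrays written by position) by an independent per-index running-max scan leftward and rightward, counting towers that strictly exceed the running max and recording the first as the closest.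
import Mathlib
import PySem

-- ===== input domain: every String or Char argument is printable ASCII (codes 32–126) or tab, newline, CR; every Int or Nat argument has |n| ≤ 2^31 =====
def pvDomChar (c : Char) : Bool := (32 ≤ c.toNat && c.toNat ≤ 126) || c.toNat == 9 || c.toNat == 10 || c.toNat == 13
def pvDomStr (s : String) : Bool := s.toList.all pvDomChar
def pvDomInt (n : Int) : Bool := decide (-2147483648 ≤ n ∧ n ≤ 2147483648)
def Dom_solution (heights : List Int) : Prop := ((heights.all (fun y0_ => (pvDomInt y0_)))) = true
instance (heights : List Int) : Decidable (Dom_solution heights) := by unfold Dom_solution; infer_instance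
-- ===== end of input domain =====

-- B replaces A's two monotonic-stack passes by an independent per-index running-max scan in each
-- direction (simpler to read, same return value; no speed claim).

-- ===== PORT A =====
-- A only ever indexes `heights` at indices drawn from `range (len heights)`, so `getD _ 0` is
-- exact for every access the program performs.

-- `while stack and heights[stack[-1]] <= heights[i]: stack.pop()` (stack held top-first)
def popA (h : Nat → Int) (x : Int) : List Nat → List Nat
  | [] => []
  | t :: r => if h t ≤ x then popA h x r else t :: r

def pvHeadInt (s : List Nat) : Int :=
  match s.head? with
  | some j => (j : Int)
  | none => -1

-- one stack pass of A over the given index order, emitting (len stack, closest) per index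
def emitA (h : Nat → Int) : List Nat → List Nat → List (Int × Int)
  | _, [] => []
  | s, i :: rest =>
      let s' := popA h (h i) s
      (((s'.length : Int)), pvHeadInt s') :: emitA h (i :: s') rest

def solution (heights : List Int) : List (Int × Int) :=
  let n := heights.length
  let h := fun j => heights.getD j 0
  let pass1 := emitA h [] (List.range n)                       -- for i in range(n)
  let pass2 := (emitA h [] ((List.range n).reverse)).reverse   -- for i in reversed(range(n))
  (List.range n).map (fun i =>
    let c1 := (pass1.getD i (0, -1)).1
    let l := (pass1.getD i (0, -1)).2
    let c2 := (pass2.getD i (0, -1)).1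
    let r := (pass2.getD i (0, -1)).2
    let closest := if l = -1 ∨ r = -1 then max l r
      else if (i : Int) - l ≤ r - (i : Int) then l else r
    (c1 + c2, closest + 1))

-- ===== PORT B =====
-- running-max scan step: count a tower iff it strictly exceeds the running max; remember the first
def stepScan (h : Nat → Int) (st : Int × Int × Int) (j : Nat) : Int × Int × Int :=
  if h j > st.2.1 then (st.1 + 1, h j, if st.2.2 = -1 then (j : Int) else st.2.2) else st

def solution_alt (heights : List Int) : List (Int × Int) :=
  let n := heights.length
  let h := fun j => heights.getD j 0
  (List.range n).map (fun i =>
    let left := ((List.range i).reverse).foldl (stepScan h) (0, h i, -1)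
    let right := (List.range' (i + 1) (n - (i + 1))).foldl (stepScan h) (0, h i, -1)
    let closest := if left.2.2 = -1 ∨ right.2.2 = -1 then max left.2.2 right.2.2
      else if (i : Int) - left.2.2 ≤ right.2.2 - (i : Int) then left.2.2 else right.2.2
    (left.1 + right.1, closest + 1))

-- ===== PRECONDITION & SPEC =====
def Spec_solution (heights : List Int) (out : List (Int × Int)) : Prop := out = solution_alt heights
instance (heights : List Int) (out : List (Int × Int)) : Decidable (Spec_solution heights out) := by unfold Spec_solution; infer_instance

-- ===== CLAIM (what is proved, stated in full; the proofs are below) =====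
def Claim_equal_solution : Prop := ∀ (heights : List Int), Dom_solution heights → Spec_solution heights (solution heights)

-- ===== LEMMAS AND PROOFS =====

-- the stack A has built after processing the index list p (top-first)
def stackOf (h : Nat → Int) (p : List Nat) : List Nat :=
  p.foldl (fun s i => i :: popA h (h i) s) []

def fmax (h : Nat → Int) (m : Int) (t : List Nat) : Int :=
  t.foldl (fun a j => max a (h j)) m

lemma stackOf_append (h : Nat → Int) (p : List Nat) (i : Nat) :
    stackOf h (p ++ [i]) = i :: popA h (h i) (stackOf h p) := by
  simp [stackOf, List.foldl_append]

lemma popA_eq_filter (h : Nat → Int) (x : Int) :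
    ∀ {s : List Nat}, s.Pairwise (fun a b => h a < h b) →
      popA h x s = s.filter (fun j => decide (x < h j)) := by
  intro s hs
  induction s with
  | nil => rfl
  | cons a t ih =>
    rcases List.pairwise_cons.mp hs with ⟨ha, ht⟩
    by_cases hax : h a ≤ x
    · have : ¬ x < h a := not_lt.mpr hax
      simp [popA, hax, this, ih ht]
    · have hxa : x < h a := lt_of_not_ge hax
      have : t.filter (fun j => decide (x < h j)) = t :=
        List.filter_eq_self.mpr (fun b hb => by simp; exact lt_trans hxa (ha b hb))
      simp [popA, hax, hxa, this]

lemma stackOf_pairwise (h : Nat → Int) :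
    ∀ p : List Nat, (stackOf h p).Pairwise (fun a b => h a < h b) := by
  intro p
  induction p using List.reverseRecOn with
  | nil => simp [stackOf]
  | append_singleton q i ih =>
    rw [stackOf_append, popA_eq_filter h (h i) ih]
    refine List.pairwise_cons.mpr ⟨?_, ih.filter _⟩
    intro b hb
    simpa using (List.of_mem_filter hb)

-- collapsing a double height filter
lemma filter_filter_le (h : Nat → Int) (y m : Int) (hym : y ≤ m) (s : List Nat) :
    (s.filter (fun j => decide (y < h j))).filter (fun j => decide (m < h j)) =
      s.filter (fun j => decide (m < h j)) := by
  rw [List.filter_filter]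
  apply List.filter_congr
  intro a _
  by_cases hma : m < h a
  · simp [hma, lt_of_le_of_lt hym hma]
  · simp [hma]

lemma filter_filter_gt (h : Nat → Int) (y m : Int) (hym : m < y) (s : List Nat) :
    (s.filter (fun j => decide (y < h j))).filter (fun j => decide (m < h j)) =
      s.filter (fun j => decide (y < h j)) := by
  rw [List.filter_filter]
  apply List.filter_congr
  intro a _
  by_cases hya : y < h a
  · simp [hya, lt_trans hym hya]
  · simp [hya]

-- THE key lemma: B's running-max scan over the processed indices in reverse order computes
-- exactly the size / head of A's popped stack (as a filter of stackOf).
lemma scan_eq (h : Nat → Int) :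
    ∀ (p : List Nat) (c₀ m cj₀ : Int),
      (p.reverse).foldl (stepScan h) (c₀, m, cj₀) =
        (c₀ + (((stackOf h p).filter (fun j => decide (m < h j))).length : Int),
         fmax h m ((stackOf h p).filter (fun j => decide (m < h j))),
         if cj₀ = -1 then pvHeadInt ((stackOf h p).filter (fun j => decide (m < h j))) else cj₀) := by
  intro p
  induction p using List.reverseRecOn with
  | nil =>
    intro c₀ m cj₀
    by_cases hc : cj₀ = -1 <;> simp [stackOf, pvHeadInt, fmax, hc]
  | append_singleton q i ih =>
    intro c₀ m cj₀
    rw [List.reverse_append]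
    simp only [List.reverse_cons, List.reverse_nil, List.nil_append, List.singleton_append,
      List.foldl_cons]
    rw [stackOf_append, popA_eq_filter h (h i) (stackOf_pairwise h q)]
    by_cases him : h i > m
    · have hmi : m < h i := him
      have hfil : ((i :: (stackOf h q).filter (fun j => decide (h i < h j))).filter
          (fun j => decide (m < h j)))
          = i :: (stackOf h q).filter (fun j => decide (h i < h j)) := by
        rw [List.filter_cons]
        simp only [hmi, decide_true, if_true]
        rw [filter_filter_gt h (h i) m hmi]
      rw [hfil]
      have hstep : stepScan h (c₀, m, cj₀) i
          = (c₀ + 1, h i, if cj₀ = -1 then (i : Int) else cj₀) := by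
        simp [stepScan, him]
      rw [hstep]
      by_cases hc : cj₀ = -1
      · simp only [hc, if_true]
        have hi1 : (i : Int) ≠ -1 := by omega
        rw [ih (c₀ + 1) (h i) (i : Int)]
        simp only [hi1, if_false, Prod.mk.injEq]
        refine ⟨by simp only [List.length_cons]; push_cast; ring, ?_, by simp [pvHeadInt]⟩
        simp only [fmax, List.foldl_cons]
        congr 1
        omega
      · simp only [hc, if_false]
        rw [ih (c₀ + 1) (h i) cj₀]
        simp only [hc, if_false, Prod.mk.injEq]
        refine ⟨by simp only [List.length_cons]; push_cast; ring, ?_, by simp⟩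
        simp only [fmax, List.foldl_cons]
        congr 1
        omega
    · have hmi : ¬ m < h i := him
      have hstep : stepScan h (c₀, m, cj₀) i = (c₀, m, cj₀) := by
        simp [stepScan, him]
      rw [hstep, ih c₀ m cj₀]
      have hfil : ((i :: (stackOf h q).filter (fun j => decide (h i < h j))).filter
          (fun j => decide (m < h j)))
          = (stackOf h q).filter (fun j => decide (m < h j)) := by
        rw [List.filter_cons]
        simp only [hmi, decide_false]
        exact filter_filter_le h (h i) m (not_lt.mp hmi) _
      rw [hfil]

-- per-index output of one stack pass of A
def emitG (h : Nat → Int) (p : List Nat) (i : Nat) : Int × Int :=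
  (((popA h (h i) (stackOf h p)).length : Int), pvHeadInt (popA h (h i) (stackOf h p)))

lemma emitA_range (h : Nat → Int) :
    ∀ (b a : Nat), emitA h (stackOf h (List.range a)) (List.range' a b)
      = (List.range' a b).map (fun i => emitG h (List.range i) i) := by
  intro b
  induction b with
  | zero => intro a; simp [emitA]
  | succ b ih =>
    intro a
    rw [List.range'_succ]
    simp only [emitA, List.map_cons]
    congr 1
    · have : (a :: popA h (h a) (stackOf h (List.range a))) = stackOf h (List.range (a + 1)) := by
        rw [List.range_succ, stackOf_append]
      rw [this]
      exact ih (a + 1)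

-- the stack sitting above index i in A's reversed pass
def rp (h : Nat → Int) (n i : Nat) : List Nat := stackOf h ((List.range' (i + 1) (n - (i + 1))).reverse)

lemma emitA_rev (h : Nat → Int) (n : Nat) :
    ∀ i, i < n → emitA h (rp h n i) ((List.range (i + 1)).reverse)
      = ((List.range (i + 1)).reverse).map
          (fun k => (((popA h (h k) (rp h n k)).length : Int), pvHeadInt (popA h (h k) (rp h n k)))) := by
  intro i
  induction i with
  | zero =>
    intro _
    simp [emitA]
  | succ i ih =>
    intro hin
    have hrev : (List.range (i + 2)).reverse = (i + 1) :: (List.range (i + 1)).reverse := by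
      rw [List.range_succ, List.reverse_append]; rfl
    rw [hrev]
    simp only [emitA, List.map_cons]
    congr 1
    · have hstep : ((i + 1) :: popA h (h (i + 1)) (rp h n (i + 1))) = rp h n i := by
        have h1 : (List.range' (i + 1 + 1) (n - (i + 1 + 1))).reverse ++ [i + 1]
            = (List.range' (i + 1) (n - (i + 1))).reverse := by
          rw [← List.reverse_cons]
          congr 1
          rw [← List.range'_succ]
          congr 1
          omega
        unfold rp
        rw [← h1, stackOf_append]
      rw [hstep]
      exact ih (by omega)

lemma getD_map_range_lt {α : Type} (f : Nat → α) (n i : Nat) (d : α) (hin : i < n) :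
    ((List.range n).map f).getD i d = f i := by
  rw [List.getD_eq_getElem?_getD]
  simp [hin]

lemma pass1_getD (h : Nat → Int) (n i : Nat) (hin : i < n) :
    (emitA h [] (List.range n)).getD i (0, -1) = emitG h (List.range i) i := by
  have h0 : (emitA h [] (List.range n)) = (List.range n).map (fun i => emitG h (List.range i) i) := by
    have := emitA_range h n 0
    simpa [stackOf, List.range_eq_range'] using this
  rw [h0, getD_map_range_lt _ _ _ _ hin]

lemma pass2_getD (h : Nat → Int) (n i : Nat) (hin : i < n) :
    ((emitA h [] ((List.range n).reverse)).reverse).getD i (0, -1)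
      = (((popA h (h i) (rp h n i)).length : Int), pvHeadInt (popA h (h i) (rp h n i))) := by
  obtain ⟨m, rfl⟩ : ∃ m, n = m + 1 := ⟨n - 1, by omega⟩
  have hrp : rp h (m + 1) m = stackOf h [] := by
    simp [rp, stackOf]
  have h0 : emitA h [] ((List.range (m + 1)).reverse)
      = ((List.range (m + 1)).reverse).map
          (fun k => (((popA h (h k) (rp h (m + 1) k)).length : Int),
            pvHeadInt (popA h (h k) (rp h (m + 1) k)))) := by
    have := emitA_rev h (m + 1) m (by omega)
    rw [hrp] at this
    simpa [stackOf] using this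
  rw [h0, List.map_reverse, List.reverse_reverse, getD_map_range_lt _ _ _ _ hin]

-- ===== VERDICT (by name: the statement is the Claim_ definition above) =====
theorem solution_spec : Claim_equal_solution := by
  intro heights _
  unfold Spec_solution solution solution_alt
  apply List.map_congr_left
  intro i hi
  have hin : i < heights.length := List.mem_range.mp hi
  set n := heights.length with hn
  set h : Nat → Int := fun j => heights.getD j 0 with hh
  have e1 := pass1_getD h n i hin
  have e2 := pass2_getD h n i hin
  have hL := scan_eq h (List.range i) 0 (h i) (-1)
  have hR := scan_eq h ((List.range' (i + 1) (n - (i + 1))).reverse) 0 (h i) (-1)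
  rw [List.reverse_reverse] at hR
  simp only [e1, e2, hL, hR, emitG, rp,
    popA_eq_filter h (h i) (stackOf_pairwise h (List.range i)),
    popA_eq_filter h (h i) (stackOf_pairwise h ((List.range' (i + 1) (n - (i + 1))).reverse))]
  simp
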